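-- pv_equiv track=rewrite | github.com/0809zheng/Cloze-Tests-Automatic-Generation | generator.py | search_adv
-- ===== SOURCE A (Python) =====
-- def search_adv(pos, index):
--     left = index - 1
--     right = index + 1
--     while left >= 0 or right < len(pos):
--         if left >= 0 and (pos[left][1] == 'RB'):
--             return pos[left][0]
--         if right < len(pos) and (pos[right][1] == 'RB'):
--             return pos[right][0]
--         left -= 1
--         right += 1
--     return None
-- ===== SOURCE B (Python) =====
-- def search_adv(pos, index):
--     best = None  # (key, word) with key = (distance, is_right); smallest key wins
--     for i, (word, tag) in enumerate(pos):
--         if tag == 'RB' and i != index: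
--             key = (abs(i - index), i > index)
--             if best is None or key < best[0]:
--                 best = (key, word)
--     return None if best is None else best[1]
-- ===== Notes on version B (the rewrite author's own statement) =====
-- stated objective: alternative
-- what changed: Replaced the outward two-pointer while-loop by a single pass over enumerate(pos) keeping the 'RB' entry with minimal key (abs(i-index), i>index), which reproduces A's left-before-right tie-break; no-RB and empty inputs yield None via the None accumulator.
-- intended difference: For index <= -2, where A's right pointer starts at the negative offset index+1 and Python's negative-index wraparound makes it probe the tail pos[len(pos)+index+1:] first, if that tail contains an 'RB' entry and the first 'RB' entry of pos lies strictly before the tail with a different word, then A returns the tail's first 'RB' word while B returns the first 'RB' word of pos, the nearest 'RB' for a position interpreted without wraparound, which is the intended value. — e.g. on search_adv([("a", "RB"), ("b", "RB")], -2): A returns some "b", B returns some "a"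
import Mathlib
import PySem

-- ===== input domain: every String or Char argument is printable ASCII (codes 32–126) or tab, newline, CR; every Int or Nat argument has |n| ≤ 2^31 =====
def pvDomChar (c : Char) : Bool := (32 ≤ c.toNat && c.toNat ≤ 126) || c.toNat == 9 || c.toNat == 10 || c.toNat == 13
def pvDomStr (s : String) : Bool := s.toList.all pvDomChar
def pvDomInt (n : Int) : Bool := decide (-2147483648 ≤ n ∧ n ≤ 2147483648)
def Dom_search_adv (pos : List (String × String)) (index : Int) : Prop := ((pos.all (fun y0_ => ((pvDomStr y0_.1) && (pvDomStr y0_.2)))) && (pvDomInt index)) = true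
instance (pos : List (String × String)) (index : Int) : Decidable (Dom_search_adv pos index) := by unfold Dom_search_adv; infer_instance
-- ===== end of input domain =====

-- B replaces A's outward two-pointer while-loop by one pass over enumerate(pos)
-- keeping the 'RB' entry with minimal key (|i-index|, i>index); same cost, different decomposition.


-- ===== PORT A =====
-- the while-loop of A; left/right move outward one step per iteration.
-- fuel is a structural counter; search_adv passes one more than the loop's iteration bound,
-- so the fuel never runs out on any input.
def searchAdvLoop (pos : List (String × String)) : Nat → Int → Int → Option String
  | 0, _, _ => none
  | fuel + 1, left, right =>
    if 0 ≤ left ∨ right < (pos.length : Int) then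
      if 0 ≤ left ∧ (PySem.List.pyGet? pos left).map Prod.snd = some "RB" then
        (PySem.List.pyGet? pos left).map Prod.fst
      else if right < (pos.length : Int) ∧ (PySem.List.pyGet? pos right).map Prod.snd = some "RB" then
        (PySem.List.pyGet? pos right).map Prod.fst
      else searchAdvLoop pos fuel (left - 1) (right + 1)
    else none

def search_adv (pos : List (String × String)) (index : Int) : Option String :=
  searchAdvLoop pos
    ((index - 1 + 1).toNat + ((pos.length : Int) - (index + 1)).toNat + 1)
    (index - 1) (index + 1)

-- ===== PORT B =====
-- Python tuple order on key = (abs(i-index), i > index): False < True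
def pyKeyLt (a b : Nat × Bool) : Bool :=
  decide (a.1 < b.1 ∨ (a.1 = b.1 ∧ a.2 = false ∧ b.2 = true))

-- body of B's for-loop: best accumulator, replaced only on a strictly smaller key
def altStep (index : Int) (best : Option ((Nat × Bool) × String))
    (e : Int × (String × String)) : Option ((Nat × Bool) × String) :=
  if e.2.2 = "RB" ∧ e.1 ≠ index then
    let key : Nat × Bool := ((e.1 - index).natAbs, decide (index < e.1))
    match best with
    | none => some (key, e.2.1)
    | some (bk, bw) => if pyKeyLt key bk then some (key, e.2.1) else some (bk, bw)
  else best

def search_adv_alt (pos : List (String × String)) (index : Int) : Option String :=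
  ((PySem.List.enumerate pos).foldl (altStep index) none).map Prod.snd

-- ===== PRECONDITION & SPEC =====
-- Pre_ is exactly the inputs on which A returns normally: for index > len(pos), and for
-- index < -len(pos)-1, A raises IndexError at pos[left] / pos[right].
def Pre_search_adv (pos : List (String × String)) (index : Int) : Prop :=
  -(pos.length : Int) - 1 ≤ index ∧ index ≤ (pos.length : Int)
instance (pos : List (String × String)) (index : Int) : Decidable (Pre_search_adv pos index) := by
  unfold Pre_search_adv; infer_instance

def pvWitness_search_adv : (List (String × String)) × Int :=
  ([("quite", "RB"), ("good", "JJ"), ("run", "VB")], 1)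

-- For index ≤ -2, where A's right pointer starts at the negative offset index+1 and Python's
-- negative-index wraparound makes it probe the tail pos[len+index+1:] first: when that tail
-- contains an 'RB' entry (first such at position j below) whose word differs from the word of
-- the first 'RB' entry of pos, A returns the tail word pos[j][0] while B returns the first
-- 'RB' word of pos, the nearest 'RB' for a position read without wraparound — the intended
-- value.  D_ states exactly that via the two first-'RB' positions of the input.
def D_search_adv (pos : List (String × String)) (index : Int) : Prop :=
  let t := pos.length + 1 - (-index).toNat
  let j := t + (pos.drop t).findIdx (·.2 == "RB")
  index ≤ -2 ∧ j < pos.length ∧ pos[pos.findIdx (·.2 == "RB")]!.1 ≠ pos[j]!.1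
instance (pos : List (String × String)) (index : Int) : Decidable (D_search_adv pos index) := by
  unfold D_search_adv; infer_instance

def Spec_search_adv (pos : List (String × String)) (index : Int) (out : Option String) : Prop := ¬ D_search_adv pos index → out = search_adv_alt pos index
instance (pos : List (String × String)) (index : Int) (out : Option String) : Decidable (Spec_search_adv pos index out) := by unfold Spec_search_adv; infer_instance

def pvDiffWitness_search_adv : (List (String × String)) × Int := ([("a", "RB"), ("b", "RB")], -2)
def pvDiffWitnessOut_search_adv : (Option String) × (Option String) := (some "b", some "a")

-- ===== CLAIM (what is proved, stated in full; the proofs are below) =====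
def Claim_unchanged_search_adv : Prop := ∀ (pos : List (String × String)) (index : Int), Dom_search_adv pos index → Pre_search_adv pos index → Spec_search_adv pos index (search_adv pos index)
def Claim_changed_search_adv : Prop := Dom_search_adv (pvDiffWitness_search_adv.1) (pvDiffWitness_search_adv.2) ∧ Pre_search_adv (pvDiffWitness_search_adv.1) (pvDiffWitness_search_adv.2) ∧ D_search_adv (pvDiffWitness_search_adv.1) (pvDiffWitness_search_adv.2) ∧ search_adv (pvDiffWitness_search_adv.1) (pvDiffWitness_search_adv.2) = pvDiffWitnessOut_search_adv.1 ∧ search_adv_alt (pvDiffWitness_search_adv.1) (pvDiffWitness_search_adv.2) = pvDiffWitnessOut_search_adv.2 ∧ pvDiffWitnessOut_search_adv.1 ≠ pvDiffWitnessOut_search_adv.2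
def Claim_exact_search_adv : Prop := ∀ (pos : List (String × String)) (index : Int), Dom_search_adv pos index → Pre_search_adv pos index → D_search_adv pos index → search_adv pos index ≠ search_adv_alt pos index

-- ===== LEMMAS AND PROOFS =====

-- the word of the first 'RB' entry of a list (proof-side abbreviation only)
def listFirstRB (xs : List (String × String)) : Option String :=
  (xs.find? (fun v => v.2 == "RB")).map Prod.fst

-- the candidate an entry contributes to B's fold
def pvCand (index : Int) (e : Int × (String × String)) : Option ((Nat × Bool) × String) :=
  altStep index none e

-- merge = min with left bias
def pvMerge (a b : Option ((Nat × Bool) × String)) : Option ((Nat × Bool) × String) :=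
  match a, b with
  | none, b => b
  | a, none => a
  | some (ka, wa), some (kb, wb) => if pyKeyLt kb ka then some (kb, wb) else some (ka, wa)

def pvBmin (index : Int) (xs : List (Int × (String × String))) : Option ((Nat × Bool) × String) :=
  xs.foldl (altStep index) none

lemma pyKeyLt_iff (a b : Nat × Bool) :
    pyKeyLt a b = true ↔ (a.1 < b.1 ∨ (a.1 = b.1 ∧ a.2 = false ∧ b.2 = true)) := by
  simp [pyKeyLt]

lemma altStep_eq_merge (index : Int) (b : Option ((Nat × Bool) × String))
    (e : Int × (String × String)) : altStep index b e = pvMerge b (pvCand index e) := by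
  rcases b with _ | ⟨k, w⟩ <;> by_cases h : e.2.2 = "RB" ∧ e.1 ≠ index <;>
    simp [altStep, pvCand, pvMerge, h]

lemma pvMerge_none_left (b : Option ((Nat × Bool) × String)) : pvMerge none b = b := by
  cases b <;> rfl

lemma pvMerge_none_right (a : Option ((Nat × Bool) × String)) : pvMerge a none = a := by
  cases a <;> rfl

lemma pvMerge_some_some (x y : (Nat × Bool) × String) :
    pvMerge (some x) (some y) = if pyKeyLt y.1 x.1 then some y else some x := rfl

lemma pvMerge_assoc (a b c : Option ((Nat × Bool) × String)) :
    pvMerge (pvMerge a b) c = pvMerge a (pvMerge b c) := by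
  rcases a with _ | ⟨⟨a1, a2⟩, wa⟩ <;> rcases b with _ | ⟨⟨b1, b2⟩, wb⟩ <;>
    rcases c with _ | ⟨⟨c1, c2⟩, wc⟩
  all_goals try simp only [pvMerge_none_left, pvMerge_none_right]
  cases a2 <;> cases b2 <;> cases c2 <;>
    simp only [pvMerge_some_some] <;> split_ifs <;>
    simp only [pvMerge_some_some] <;> split_ifs <;>
    first
      | rfl
      | (exfalso; simp_all [pyKeyLt]; omega)

lemma foldl_eq_merge_bmin (index : Int) (xs : List (Int × (String × String)))
    (acc : Option ((Nat × Bool) × String)) :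
    xs.foldl (altStep index) acc = pvMerge acc (pvBmin index xs) := by
  induction xs generalizing acc with
  | nil => simp [pvBmin, pvMerge_none_right]
  | cons x xs ih =>
      have h2 : pvBmin index (x :: xs) = pvMerge (pvCand index x) (pvBmin index xs) := by
        rw [pvBmin, List.foldl_cons, altStep_eq_merge, pvMerge_none_left]
        exact ih _
      rw [List.foldl_cons, altStep_eq_merge, ih, h2, pvMerge_assoc]

lemma bmin_cons (index : Int) (x : Int × (String × String))
    (xs : List (Int × (String × String))) :
    pvBmin index (x :: xs) = pvMerge (pvCand index x) (pvBmin index xs) := by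
  rw [pvBmin, List.foldl_cons, altStep_eq_merge, pvMerge_none_left]
  exact foldl_eq_merge_bmin index xs _

lemma bmin_mem (index : Int) (xs : List (Int × (String × String))) (k : Nat × Bool) (w : String)
    (h : pvBmin index xs = some (k, w)) : ∃ e ∈ xs, pvCand index e = some (k, w) := by
  induction xs with
  | nil => simp [pvBmin] at h
  | cons x xs ih =>
      rw [bmin_cons] at h
      rcases hc : pvCand index x with _ | ⟨ka, wa⟩ <;> rw [hc] at h
      · rw [pvMerge_none_left] at h
        rcases ih h with ⟨e, he, hce⟩
        exact ⟨e, List.mem_cons_of_mem _ he, hce⟩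
      · rcases hb : pvBmin index xs with _ | ⟨kb, wb⟩ <;> rw [hb] at h
        · rw [pvMerge_none_right] at h
          exact ⟨x, List.mem_cons_self, hc.trans h⟩
        · rw [pvMerge_some_some] at h
          split_ifs at h
          · rcases ih (hb.trans h) with ⟨e, he, hce⟩
            exact ⟨e, List.mem_cons_of_mem _ he, hce⟩
          · exact ⟨x, List.mem_cons_self, hc.trans h⟩

lemma pyKeyLt_irrefl (k : Nat × Bool) : pyKeyLt k k = false := by
  rcases k with ⟨k1, k2⟩; cases k2 <;> simp [pyKeyLt]

lemma pyKeyLt_asymm (a b : Nat × Bool) (h : pyKeyLt a b = true) : pyKeyLt b a = false := by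
  rcases a with ⟨a1, a2⟩; rcases b with ⟨b1, b2⟩
  revert h; cases a2 <;> cases b2 <;> simp [pyKeyLt] <;> omega

-- the fold returns a strict-minimum candidate
lemma bmin_eq_of_min (index : Int) (xs : List (Int × (String × String)))
    (k0 : Nat × Bool) (w0 : String)
    (hmem : ∃ e ∈ xs, pvCand index e = some (k0, w0))
    (hmin : ∀ e ∈ xs, ∀ k w, pvCand index e = some (k, w) →
        (k = k0 ∧ w = w0) ∨ pyKeyLt k0 k = true) :
    pvBmin index xs = some (k0, w0) := by
  induction xs with
  | nil => simp at hmem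
  | cons x xs ih =>
      rw [bmin_cons]
      by_cases hx : pvCand index x = some (k0, w0)
      · rw [hx]
        rcases hb : pvBmin index xs with _ | ⟨k, w⟩
        · rw [pvMerge_none_right]
        · rcases bmin_mem index xs k w hb with ⟨e, he, hce⟩
          rcases hmin e (List.mem_cons_of_mem _ he) k w hce with ⟨hk, hw⟩ | hlt
          · subst hk; subst hw; rw [pvMerge_some_some]; simp [pyKeyLt_irrefl]
          · rw [pvMerge_some_some]; simp [pyKeyLt_asymm _ _ hlt]
      · have hmem' : ∃ e ∈ xs, pvCand index e = some (k0, w0) := by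
          rcases hmem with ⟨e, he, hce⟩
          rcases List.mem_cons.mp he with rfl | he'
          · exact absurd hce hx
          · exact ⟨e, he', hce⟩
        rw [ih hmem' (fun e he => hmin e (List.mem_cons_of_mem _ he))]
        rcases hc : pvCand index x with _ | ⟨k, w⟩
        · rw [pvMerge_none_left]
        · rcases hmin x List.mem_cons_self k w hc with ⟨hk, hw⟩ | hlt
          · exact absurd (by rw [hc, hk, hw]) hx
          · rw [pvMerge_some_some]; simp [hlt]

-- dropping entries whose candidate is none does not change the fold
lemma bmin_filter (index : Int) (p : Int × (String × String) → Bool)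
    (xs : List (Int × (String × String)))
    (h : ∀ e ∈ xs, p e = false → pvCand index e = none) :
    pvBmin index xs = pvBmin index (xs.filter p) := by
  induction xs with
  | nil => rfl
  | cons x xs ih =>
      have ih' := ih (fun e he => h e (List.mem_cons_of_mem _ he))
      by_cases hp : p x = true
      · rw [bmin_cons, List.filter_cons_of_pos hp, bmin_cons, ih']
      · rw [bmin_cons, h x List.mem_cons_self (by simpa using hp), pvMerge_none_left,
          List.filter_cons_of_neg (by simpa using hp), ih']

-- candidates at distance ≥ d
def pvCands (pos : List (String × String)) (index : Int) (d : Nat) :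
    List (Int × (String × String)) :=
  (PySem.List.enumerate pos).filter (fun e => d ≤ (e.1 - index).natAbs)

lemma mem_enumerate_shape (pos : List (String × String)) (e : Int × (String × String))
    (h : e ∈ PySem.List.enumerate pos) :
    0 ≤ e.1 ∧ e.1 < (pos.length : Int) ∧ PySem.List.pyGet? pos e.1 = some e.2 := by
  rcases (PySem.List.mem_enumerate_iff pos 0 e).mp h with ⟨k, hk, rfl⟩
  refine ⟨by omega, by simp; omega, ?_⟩
  simp [List.getElem?_eq_getElem hk]

lemma mem_enum_of_get (pos : List (String × String)) (i : Int) (v : String × String)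
    (h0 : 0 ≤ i) (hget : PySem.List.pyGet? pos i = some v) :
    (i, v) ∈ PySem.List.enumerate pos := by
  have hg2 : pos[i.toNat]? = some v := (PySem.List.pyGet?_of_nonneg pos h0).symm.trans hget
  rcases List.getElem?_eq_some_iff.mp hg2 with ⟨hlt, hv⟩
  refine (PySem.List.mem_enumerate_iff pos 0 (i, v)).mpr ⟨i.toNat, hlt, ?_⟩
  rw [Prod.ext_iff]
  exact ⟨by simp; omega, hv.symm⟩

lemma cand_eq_some (index : Int) (e : Int × (String × String)) (hd : e.1 ≠ index)
    (ht : e.2.2 = "RB") :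
    pvCand index e = some (((e.1 - index).natAbs, decide (index < e.1)), e.2.1) := by
  simp [pvCand, altStep, ht, hd]

lemma cand_shape (index : Int) (e : Int × (String × String)) (k : Nat × Bool) (w : String)
    (h : pvCand index e = some (k, w)) :
    e.2.2 = "RB" ∧ e.1 ≠ index ∧ k = ((e.1 - index).natAbs, decide (index < e.1)) ∧ w = e.2.1 := by
  by_cases hc : e.2.2 = "RB" ∧ e.1 ≠ index
  · simp [pvCand, altStep, hc] at h
    exact ⟨hc.1, hc.2, h.1.symm, h.2.symm⟩
  · simp [pvCand, altStep, hc] at h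

-- the main loop invariant: at distance d the loop computes the minimum over candidates of distance ≥ d
lemma loop_eq_bmin (pos : List (String × String)) (index : Int) :
    ∀ (fuel d : Nat), 1 ≤ d →
      index - d < (pos.length : Int) → 0 ≤ index + d →
      (index - d + 1).toNat + ((pos.length : Int) - (index + d)).toNat < fuel →
      searchAdvLoop pos fuel (index - d) (index + d) =
        (pvBmin index (pvCands pos index d)).map Prod.snd := by
  intro fuel
  induction fuel with
  | zero =>
      intro d hd hl hr hm
      exact absurd hm (Nat.not_lt_zero _)
  | succ m ih =>
      intro d hd hl hr hm
      rw [searchAdvLoop]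
      by_cases hcond : 0 ≤ index - (d : Int) ∨ index + d < (pos.length : Int)
      · rw [if_pos hcond]
        by_cases hleft : 0 ≤ index - (d : Int) ∧
            (PySem.List.pyGet? pos (index - d)).map Prod.snd = some "RB"
        · -- left hit: the minimal candidate is at index - d with key (d, false)
          rw [if_pos hleft]
          obtain ⟨hl0, hltag0⟩ := hleft
          rcases hget : PySem.List.pyGet? pos (index - d) with _ | v
          · rw [hget] at hltag0; simp at hltag0
          · rw [hget] at hltag0
            simp only [Option.map_some, Option.some.injEq] at hltag0
            have hmem : (index - (d : Int), v) ∈ PySem.List.enumerate pos :=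
              mem_enum_of_get pos _ v hl0 hget
            have hin : (index - (d : Int), v) ∈ pvCands pos index d := by
              rw [pvCands, List.mem_filter]
              exact ⟨hmem, decide_eq_true (by omega)⟩
            have hed : (index - (d : Int)) ≠ index := by omega
            have hc0 : pvCand index (index - (d : Int), v) = some ((d, false), v.1) := by
              rw [cand_eq_some index _ hed hltag0]
              have h1 : ((index - (d : Int)) - index).natAbs = d := by omega
              have h2 : decide (index < index - (d : Int)) = false := decide_eq_false (by omega)
              simp only [h1, h2]
            have hbm : pvBmin index (pvCands pos index d) = some ((d, false), v.1) := by
              apply bmin_eq_of_min index _ _ _ ⟨_, hin, hc0⟩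
              intro e he k w hc
              have hes := mem_enumerate_shape pos e ((List.mem_filter.mp he).1)
              have hdist : d ≤ (e.1 - index).natAbs := by
                have := (List.mem_filter.mp he).2
                simp only [decide_eq_true_eq] at this
                omega
              rcases cand_shape index e k w hc with ⟨ht, hne, hk, hw⟩
              by_cases hgt : d < (e.1 - index).natAbs
              · right; rw [hk, pyKeyLt_iff]; left; simpa using hgt
              · have heq : (e.1 - index).natAbs = d := by omega
                by_cases hside : index < e.1
                · -- e is the right neighbour at distance d: (d,false) < (d,true)
                  right; rw [hk, pyKeyLt_iff]; right
                  simp [heq, hside]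
                · -- e is the left entry itself
                  left
                  have he1 : e.1 = index - d := by omega
                  have hev : e.2 = v := by
                    have h3 := hes.2.2
                    rw [he1, hget] at h3
                    exact (Option.some.inj h3).symm
                  have h2 : decide (index < e.1) = false := decide_eq_false (by omega)
                  rw [hk, hw, hev]
                  exact ⟨by rw [heq, h2], rfl⟩
            rw [hbm]; rfl
        · rw [if_neg hleft]
          by_cases hright : index + (d : Int) < (pos.length : Int) ∧
              (PySem.List.pyGet? pos (index + d)).map Prod.snd = some "RB"
          · -- right hit, left miss: minimal candidate at index + d with key (d, true)
            rw [if_pos hright]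
            obtain ⟨hr0, hrtag0⟩ := hright
            rcases hget : PySem.List.pyGet? pos (index + d) with _ | v
            · rw [hget] at hrtag0; simp at hrtag0
            · rw [hget] at hrtag0
              simp only [Option.map_some, Option.some.injEq] at hrtag0
              have hmem : (index + (d : Int), v) ∈ PySem.List.enumerate pos :=
                mem_enum_of_get pos _ v hr hget
              have hin : (index + (d : Int), v) ∈ pvCands pos index d := by
                rw [pvCands, List.mem_filter]
                exact ⟨hmem, decide_eq_true (by omega)⟩
              have hed : (index + (d : Int)) ≠ index := by omega
              have hc0 : pvCand index (index + (d : Int), v) = some ((d, true), v.1) := by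
                rw [cand_eq_some index _ hed hrtag0]
                have h1 : ((index + (d : Int)) - index).natAbs = d := by omega
                have h2 : decide (index < index + (d : Int)) = true := decide_eq_true (by omega)
                simp only [h1, h2]
              have hbm : pvBmin index (pvCands pos index d) = some ((d, true), v.1) := by
                apply bmin_eq_of_min index _ _ _ ⟨_, hin, hc0⟩
                intro e he k w hc
                have hes := mem_enumerate_shape pos e ((List.mem_filter.mp he).1)
                have hdist : d ≤ (e.1 - index).natAbs := by
                  have := (List.mem_filter.mp he).2
                  simp only [decide_eq_true_eq] at this
                  omega
                rcases cand_shape index e k w hc with ⟨ht, hne, hk, hw⟩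
                by_cases hgt : d < (e.1 - index).natAbs
                · right; rw [hk, pyKeyLt_iff]; left; simpa using hgt
                · have heq : (e.1 - index).natAbs = d := by omega
                  by_cases hside : index < e.1
                  · -- e is the right entry itself
                    left
                    have he1 : e.1 = index + d := by omega
                    have hev : e.2 = v := by
                      have h3 := hes.2.2
                      rw [he1, hget] at h3
                      exact (Option.some.inj h3).symm
                    have h2 : decide (index < e.1) = true := decide_eq_true (by omega)
                    rw [hk, hw, hev]
                    exact ⟨by rw [heq, h2], rfl⟩
                  · -- e would be the left neighbour at distance d; but it is not 'RB'
                    exfalso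
                    have he1 : e.1 = index - d := by omega
                    apply hleft
                    refine ⟨by omega, ?_⟩
                    have h3 := hes.2.2
                    rw [he1] at h3
                    rw [h3]
                    simp [ht]
              rw [hbm]; rfl
          · -- no hit at distance d: recurse; candidates at distance exactly d contribute none
            rw [if_neg hright]
            have hrec : searchAdvLoop pos m (index - d - 1) (index + d + 1) =
                (pvBmin index (pvCands pos index (d + 1))).map Prod.snd := by
              have h1 : index - (d : Int) - 1 = index - ((d + 1 : Nat) : Int) := by push_cast; ring
              have h2 : index + (d : Int) + 1 = index + ((d + 1 : Nat) : Int) := by push_cast; ring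
              rw [h1, h2]
              exact ih (d + 1) (by omega) (by omega) (by omega) (by omega)
            rw [hrec]
            have hstep : pvBmin index (pvCands pos index d) =
                pvBmin index (pvCands pos index (d + 1)) := by
              have hfil : pvCands pos index (d + 1) =
                  (pvCands pos index d).filter
                    (fun e => decide (d + 1 ≤ (e.1 - index).natAbs)) := by
                rw [pvCands, pvCands, List.filter_filter]
                apply List.filter_congr
                intro e _
                by_cases h : d + 1 ≤ (e.1 - index).natAbs
                · simp [h]; omega
                · simp [h]
              rw [hfil]
              apply bmin_filter
              intro e he hp
              have hes := mem_enumerate_shape pos e ((List.mem_filter.mp he).1)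
              have hdist : d ≤ (e.1 - index).natAbs := by
                have := (List.mem_filter.mp he).2
                simp only [decide_eq_true_eq] at this
                omega
              have heq : (e.1 - index).natAbs = d := by
                simp only [decide_eq_false_iff_not, not_le] at hp
                omega
              by_cases hside : index < e.1
              · have he1 : e.1 = index + d := by omega
                have hnot : ¬ e.2.2 = "RB" := by
                  intro ht
                  apply hright
                  refine ⟨by omega, ?_⟩
                  have h3 := hes.2.2
                  rw [he1] at h3
                  rw [h3]
                  simp [ht]
                simp [pvCand, altStep, hnot]
              · have he1 : e.1 = index - d := by omega
                have hnot : ¬ e.2.2 = "RB" := by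
                  intro ht
                  apply hleft
                  refine ⟨by omega, ?_⟩
                  have h3 := hes.2.2
                  rw [he1] at h3
                  rw [h3]
                  simp [ht]
                simp [pvCand, altStep, hnot]
            rw [hstep]
      · rw [if_neg hcond]
        have hnil : pvCands pos index d = [] := by
          refine List.filter_eq_nil_iff.mpr (fun e he => ?_)
          have hs := mem_enumerate_shape pos e he
          simp only [decide_eq_true_eq, not_le]
          omega
        rw [hnil]; rfl

theorem pv_main (pos : List (String × String)) (index : Int)
    (h1 : -1 ≤ index) (h2 : index ≤ (pos.length : Int)) :
    search_adv pos index = search_adv_alt pos index := by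
  have hA : search_adv pos index =
      (pvBmin index (pvCands pos index 1)).map Prod.snd := by
    rw [search_adv]
    have e1 : index - 1 = index - ((1 : Nat) : Int) := by norm_num
    have e2 : index + 1 = index + ((1 : Nat) : Int) := by norm_num
    rw [e1, e2]
    exact loop_eq_bmin pos index
      ((index - 1 + 1).toNat + ((pos.length : Int) - (index + 1)).toNat + 1)
      1 le_rfl (by push_cast; omega) (by push_cast; omega) (by push_cast; omega)
  have hB : search_adv_alt pos index =
      (pvBmin index (pvCands pos index 1)).map Prod.snd := by
    rw [search_adv_alt]
    congr 1
    show pvBmin index (PySem.List.enumerate pos) = _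
    rw [pvCands]
    apply bmin_filter
    intro e _ hp
    have : e.1 = index := by
      simp only [decide_eq_false_iff_not, not_le] at hp
      omega
    simp [pvCand, altStep, this]
  rw [hA, hB]

-- ===== wrap region (index ≤ -2): A scans via Python's negative-index wraparound =====

-- the loop once left has gone negative for good: a single rightward scan
def negScan (pos : List (String × String)) (right : Int) : Option String :=
  if right < (pos.length : Int) then
    if (PySem.List.pyGet? pos right).map Prod.snd = some "RB" then
      (PySem.List.pyGet? pos right).map Prod.fst
    else negScan pos (right + 1)
  else none
termination_by ((pos.length : Int) - right).toNat
decreasing_by omega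

lemma loop_neg (pos : List (String × String)) :
    ∀ (fuel : Nat) (left right : Int), left < 0 →
      ((pos.length : Int) - right).toNat < fuel →
      searchAdvLoop pos fuel left right = negScan pos right := by
  intro fuel
  induction fuel with
  | zero =>
      intro left right hl hm
      exact absurd hm (Nat.not_lt_zero _)
  | succ m ih =>
      intro left right hl hm
      rw [searchAdvLoop, negScan]
      by_cases h1 : right < (pos.length : Int)
      · rw [if_pos (by omega), if_neg (by omega), if_pos h1]
        by_cases h2 : (PySem.List.pyGet? pos right).map Prod.snd = some "RB"
        · rw [if_pos ⟨h1, h2⟩, if_pos h2]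
        · rw [if_neg (by intro hc; exact h2 hc.2), if_neg h2]
          exact ih _ _ (by omega) (by omega)
      · rw [if_neg (by omega), if_neg h1]

lemma negScan_nonneg (pos : List (String × String)) :
    ∀ (m : Nat) (r : Int), 0 ≤ r →
      ((pos.length : Int) - r).toNat ≤ m →
      negScan pos r = listFirstRB (pos.drop r.toNat) := by
  intro m
  induction m with
  | zero =>
      intro r h0 hm
      rw [negScan, if_neg (by omega)]
      rw [List.drop_eq_nil_of_le (by omega)]
      rfl
  | succ m ih =>
      intro r h0 hm
      rw [negScan]
      by_cases h1 : r < (pos.length : Int)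
      · rw [if_pos h1]
        have hlt : r.toNat < pos.length := by omega
        have hget : PySem.List.pyGet? pos r = some pos[r.toNat] := by
          rw [PySem.List.pyGet?_of_nonneg pos h0, List.getElem?_eq_getElem hlt]
        have hdrop : pos.drop r.toNat = pos[r.toNat] :: pos.drop (r.toNat + 1) :=
          List.drop_eq_getElem_cons hlt
        by_cases h2 : pos[r.toNat].2 = "RB"
        · rw [if_pos (by rw [hget]; simp [h2]), hget, listFirstRB, hdrop,
            List.find?_cons_of_pos (by simp [h2])]
        · rw [if_neg (by rw [hget]; simp [h2])]
          have hr1 : (r + 1).toNat = r.toNat + 1 := by omega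
          rw [ih (r + 1) (by omega) (by omega), hr1, listFirstRB, listFirstRB, hdrop,
            List.find?_cons_of_neg (by simp [h2])]
      · rw [if_neg h1, List.drop_eq_nil_of_le (by omega)]
          ; rfl

lemma negScan_neg (pos : List (String × String)) :
    ∀ (m : Nat) (r : Int), -(pos.length : Int) ≤ r → r < 0 →
      (-r).toNat ≤ m →
      negScan pos r =
        (match listFirstRB (pos.drop ((pos.length : Int) + r).toNat) with
         | some w => some w
         | none => negScan pos 0) := by
  intro m
  induction m with
  | zero => intro r h0 h1 hm; exact absurd hm (by omega)
  | succ m ih =>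
      intro r h0 h1 hm
      have hlen : 0 < pos.length := by omega
      rw [negScan, if_pos (by omega)]
      have hk : r = -(((-r).toNat : Nat) : Int) := by omega
      have hget : PySem.List.pyGet? pos r = pos[pos.length - (-r).toNat]? := by
        conv_lhs => rw [hk]
        exact PySem.List.pyGet?_neg_natCast pos (-r).toNat (by omega) (by omega)
      have hj : pos.length - (-r).toNat = ((pos.length : Int) + r).toNat := by omega
      have hjlt : ((pos.length : Int) + r).toNat < pos.length := by omega
      rw [hj] at hget
      rw [List.getElem?_eq_getElem hjlt] at hget
      have hdrop : pos.drop ((pos.length : Int) + r).toNat =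
          pos[((pos.length : Int) + r).toNat] :: pos.drop (((pos.length : Int) + r).toNat + 1) :=
        List.drop_eq_getElem_cons hjlt
      by_cases h2 : pos[((pos.length : Int) + r).toNat].2 = "RB"
      · rw [if_pos (by rw [hget]; simp [h2]), hget, listFirstRB, hdrop,
          List.find?_cons_of_pos (by simp [h2])]
        rfl
      · rw [if_neg (by rw [hget]; simp [h2])]
        have hstep : listFirstRB (pos.drop ((pos.length : Int) + r).toNat) =
            listFirstRB (pos.drop (((pos.length : Int) + r).toNat + 1)) := by
          rw [listFirstRB, hdrop, List.find?_cons_of_neg (by simp [h2])]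
          rfl
        by_cases h3 : r + 1 < 0
        · have he : ((pos.length : Int) + (r + 1)).toNat = ((pos.length : Int) + r).toNat + 1 := by
            omega
          rw [ih (r + 1) (by omega) h3 (by omega), he, hstep]
        · have hr0 : r + 1 = 0 := by omega
          have he : ((pos.length : Int) + r).toNat + 1 = pos.length := by omega
          have hnil : pos.drop (((pos.length : Int) + r).toNat + 1) = [] := by
            rw [he]; exact List.drop_length
          have hnone : listFirstRB (pos.drop ((pos.length : Int) + r).toNat) = none := by
            rw [hstep, hnil]; rfl
          rw [hr0, hnone]

lemma mem_enum_lb (pos : List (String × String)) (s : Int) (e : Int × (String × String))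
    (h : e ∈ PySem.List.enumerate pos s) : s ≤ e.1 := by
  rcases (PySem.List.mem_enumerate_iff pos s e).mp h with ⟨k, hk, rfl⟩
  simp

lemma bmin_enum_right (index : Int) :
    ∀ (xs : List (String × String)) (s : Int), index < s →
      pvBmin index (PySem.List.enumerate xs s) =
        ((PySem.List.enumerate xs s).find? (fun e => e.2.2 == "RB")).map
          (fun e => (((e.1 - index).natAbs, true), e.2.1)) := by
  intro xs
  induction xs with
  | nil => intro s hs; simp [pvBmin, PySem.List.enumerate_nil]
  | cons x xs ih =>
      intro s hs
      rw [PySem.List.enumerate_cons, bmin_cons]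
      by_cases h2 : x.2 = "RB"
      · have hc : pvCand index (s, x) = some (((s - index).natAbs, true), x.1) := by
          rw [cand_eq_some index _ (by omega) h2]
          simp [decide_eq_true (show index < s from hs)]
        rw [hc, List.find?_cons_of_pos (by simp [h2])]
        rcases hb : pvBmin index (PySem.List.enumerate xs (s + 1)) with _ | ⟨kb, wb⟩
        · rw [pvMerge_none_right]; rfl
        · rcases bmin_mem index _ _ _ hb with ⟨e, he, hce⟩
          have he1 : s + 1 ≤ e.1 := mem_enum_lb xs (s + 1) e he
          rcases cand_shape index e kb wb hce with ⟨_, _, hk, _⟩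
          have hlt : pyKeyLt kb ((s - index).natAbs, true) = false := by
            rw [hk]
            exact decide_eq_false (by simp; omega)
          rw [pvMerge_some_some, hlt, if_neg (by simp)]
          rfl
      · have hc : pvCand index (s, x) = none := by
          simp [pvCand, altStep, h2]
        rw [hc, pvMerge_none_left, List.find?_cons_of_neg (by simp [h2])]
        exact ih (s + 1) (by omega)

lemma enum_find_snd (pos : List (String × String)) :
    ∀ (s : Int),
      ((PySem.List.enumerate pos s).find? (fun e => e.2.2 == "RB")).map Prod.snd =
        pos.find? (fun v => v.2 == "RB") := by
  induction pos with
  | nil => intro s; simp [PySem.List.enumerate_nil]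
  | cons x xs ih =>
      intro s
      rw [PySem.List.enumerate_cons]
      by_cases h2 : x.2 = "RB"
      · rw [List.find?_cons_of_pos (by simp [h2]), List.find?_cons_of_pos (by simp [h2])]
        rfl
      · rw [List.find?_cons_of_neg (by simp [h2]), List.find?_cons_of_neg (by simp [h2])]
        exact ih (s + 1)

lemma alt_eq_firstRB (pos : List (String × String)) (index : Int) (h : index < 0) :
    search_adv_alt pos index = listFirstRB pos := by
  rw [search_adv_alt]
  show (pvBmin index (PySem.List.enumerate pos 0)).map Prod.snd = _
  rw [bmin_enum_right index pos 0 h]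
  have := enum_find_snd pos 0
  rcases hf : (PySem.List.enumerate pos 0).find? (fun e => e.2.2 == "RB") with _ | e <;>
    rw [hf] at this <;> rw [hf, listFirstRB, ← this] <;> rfl

-- the wrap-tail first-RB index against the first-RB index of pos, in find? terms
lemma D_char (pos : List (String × String)) (t : Nat) (ht : t ≤ pos.length) :
    (t + (pos.drop t).findIdx (fun v => v.2 == "RB") < pos.length ∧
     pos[pos.findIdx (fun v => v.2 == "RB")]!.1 ≠
       pos[t + (pos.drop t).findIdx (fun v => v.2 == "RB")]!.1) ↔
      (listFirstRB (pos.drop t) ≠ none ∧ listFirstRB (pos.drop t) ≠ listFirstRB pos) := by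
  have hfind : (pos.drop t).find? (fun v => v.2 == "RB") =
      (pos.drop t)[(pos.drop t).findIdx (fun v => v.2 == "RB")]? :=
    List.find?_eq_getElem?_findIdx
  have hfindP : pos.find? (fun v => v.2 == "RB") = pos[pos.findIdx (fun v => v.2 == "RB")]? :=
    List.find?_eq_getElem?_findIdx
  have hdl : (pos.drop t).length = pos.length - t := List.length_drop
  constructor
  · rintro ⟨hj, hne⟩
    have hfi : (pos.drop t).findIdx (fun v => v.2 == "RB") < (pos.drop t).length := by omega
    have hjn : t + (pos.drop t).findIdx (fun v => v.2 == "RB") < pos.length := by omega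
    have hdrop_get : (pos.drop t)[(pos.drop t).findIdx (fun v => v.2 == "RB")]'hfi =
        pos[t + (pos.drop t).findIdx (fun v => v.2 == "RB")]'hjn := List.getElem_drop
    have h1 : listFirstRB (pos.drop t) =
        some (pos[t + (pos.drop t).findIdx (fun v => v.2 == "RB")]'hjn).1 := by
      rw [listFirstRB, hfind, List.getElem?_eq_getElem hfi, hdrop_get]
      rfl
    have hfound : (pos.drop t).find? (fun v => v.2 == "RB") =
        some ((pos.drop t)[(pos.drop t).findIdx (fun v => v.2 == "RB")]'hfi) := by
      rw [hfind, List.getElem?_eq_getElem hfi]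
    have hRB := List.find?_some hfound
    rw [hdrop_get] at hRB
    have hPex : pos.findIdx (fun v => v.2 == "RB") < pos.length :=
      List.findIdx_lt_length.mpr ⟨_, List.getElem_mem hjn, hRB⟩
    have h2 : listFirstRB pos = some (pos[pos.findIdx (fun v => v.2 == "RB")]'hPex).1 := by
      rw [listFirstRB, hfindP, List.getElem?_eq_getElem hPex]
      rfl
    rw [getElem!_pos pos _ hPex, getElem!_pos pos _ hjn] at hne
    refine ⟨by rw [h1]; simp, ?_⟩
    rw [h1, h2]
    simpa using Ne.symm hne
  · rintro ⟨h1, h2⟩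
    have hfi : (pos.drop t).findIdx (fun v => v.2 == "RB") < (pos.drop t).length := by
      by_contra hge
      apply h1
      rw [listFirstRB, hfind, List.getElem?_eq_none (by omega)]
      rfl
    have hjn : t + (pos.drop t).findIdx (fun v => v.2 == "RB") < pos.length := by omega
    have hdrop_get : (pos.drop t)[(pos.drop t).findIdx (fun v => v.2 == "RB")]'hfi =
        pos[t + (pos.drop t).findIdx (fun v => v.2 == "RB")]'hjn := List.getElem_drop
    have hA : listFirstRB (pos.drop t) =
        some (pos[t + (pos.drop t).findIdx (fun v => v.2 == "RB")]'hjn).1 := by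
      rw [listFirstRB, hfind, List.getElem?_eq_getElem hfi, hdrop_get]
      rfl
    have hfound : (pos.drop t).find? (fun v => v.2 == "RB") =
        some ((pos.drop t)[(pos.drop t).findIdx (fun v => v.2 == "RB")]'hfi) := by
      rw [hfind, List.getElem?_eq_getElem hfi]
    have hRB := List.find?_some hfound
    rw [hdrop_get] at hRB
    have hPex : pos.findIdx (fun v => v.2 == "RB") < pos.length :=
      List.findIdx_lt_length.mpr ⟨_, List.getElem_mem hjn, hRB⟩
    have hB : listFirstRB pos = some (pos[pos.findIdx (fun v => v.2 == "RB")]'hPex).1 := by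
      rw [listFirstRB, hfindP, List.getElem?_eq_getElem hPex]
      rfl
    rw [hA, hB] at h2
    refine ⟨hjn, ?_⟩
    rw [getElem!_pos pos _ hPex, getElem!_pos pos _ hjn]
    exact fun hh => h2 (by rw [hh])

-- D_search_adv, stated over positions and tags of the input, is exactly the condition
-- 'the wrapped tail has a first RB word differing from the first RB word of pos'
lemma D_iff (pos : List (String × String)) (index : Int)
    (hlb : -(pos.length : Int) - 1 ≤ index) (hneg : index ≤ -2) :
    D_search_adv pos index ↔
      (listFirstRB (pos.drop (pos.length + 1 - (-index).toNat)) ≠ none ∧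
       listFirstRB (pos.drop (pos.length + 1 - (-index).toNat)) ≠ listFirstRB pos) := by
  have htn : pos.length + 1 - (-index).toNat ≤ pos.length := by omega
  constructor
  · rintro ⟨-, hj, hne⟩
    exact (D_char pos _ htn).mp ⟨hj, hne⟩
  · intro h
    exact ⟨hneg, (D_char pos _ htn).mpr h⟩

lemma wrap_A (pos : List (String × String)) (index : Int)
    (hneg : index ≤ -2) (hlb : -(pos.length : Int) - 1 ≤ index) :
    search_adv pos index =
      (match listFirstRB (pos.drop ((pos.length : Int) + index + 1).toNat) with
       | some w => some w
       | none => listFirstRB pos) := by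
  have hlen : 0 < pos.length := by omega
  rw [search_adv, loop_neg pos _ _ _ (by omega) (by omega),
    negScan_neg pos ((-(index + 1)).toNat) _ (by omega) (by omega) le_rfl]
  have hz : negScan pos 0 = listFirstRB pos := by
    rw [negScan_nonneg pos ((pos.length : Int)).toNat 0 le_rfl (by omega)]
    rfl
  have ht : ((pos.length : Int) + (index + 1)).toNat = ((pos.length : Int) + index + 1).toNat := by
    omega
  rw [ht]
  rcases listFirstRB (pos.drop ((pos.length : Int) + index + 1).toNat) with _ | w
  · exact hz
  · rfl

lemma pv_wrap (pos : List (String × String)) (index : Int)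
    (hneg : index ≤ -2) (hlb : -(pos.length : Int) - 1 ≤ index)
    (hnD : ¬ D_search_adv pos index) :
    search_adv pos index = search_adv_alt pos index := by
  rw [wrap_A pos index hneg hlb, alt_eq_firstRB pos index (by omega)]
  rcases hf2 : listFirstRB (pos.drop ((pos.length : Int) + index + 1).toNat) with _ | w2
  · rfl
  · have htN : pos.length + 1 - (-index).toNat = ((pos.length : Int) + index + 1).toNat := by
      omega
    have heq : listFirstRB (pos.drop (pos.length + 1 - (-index).toNat)) = listFirstRB pos := by
      by_contra hh
      exact hnD ((D_iff pos index hlb hneg).mpr ⟨by rw [htN, hf2]; simp, hh⟩)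
    rw [htN, hf2] at heq
    exact heq

lemma pv_tight (pos : List (String × String)) (index : Int)
    (hlb : -(pos.length : Int) - 1 ≤ index)
    (hD : D_search_adv pos index) :
    search_adv pos index ≠ search_adv_alt pos index := by
  have hneg : index ≤ -2 := hD.1
  obtain ⟨h2, h3⟩ := (D_iff pos index hlb hneg).mp hD
  have htN : pos.length + 1 - (-index).toNat = ((pos.length : Int) + index + 1).toNat := by
    omega
  rw [htN] at h2 h3
  rcases hf2 : listFirstRB (pos.drop ((pos.length : Int) + index + 1).toNat) with _ | w2
  · exact absurd hf2 h2
  · rw [hf2] at h3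
    rw [wrap_A pos index hneg hlb, hf2, alt_eq_firstRB pos index (by omega)]
    exact h3

-- ===== VERDICT (by name: the statement is the Claim_ definition above) =====
theorem search_adv_spec : Claim_unchanged_search_adv := by
  intro pos index _ hpre hnD
  rcases le_or_gt (-1) index with h | h
  · exact pv_main pos index h hpre.2
  · exact pv_wrap pos index (by omega) (by have := hpre.1; omega) hnD

theorem search_adv_changed : Claim_changed_search_adv := by
  unfold Claim_changed_search_adv
  decide

theorem search_adv_tight : Claim_exact_search_adv := by
  intro pos index _ hpre hD
  exact pv_tight pos index (by have := hpre.1; omega) hD
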